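-- pv_equiv track=rewrite | github.com/Kureii/AffineCipher | Fce.py | Steps
-- ===== SOURCE A (Python) =====
-- import math
--
-- def Steps(string, steps):
--     Lenght = len(string)
--     iterations = math.ceil(Lenght / steps)
--     newString =""
--     for i in range(iterations):
--         for j in range(steps):
--             index = i * steps + j
--             if index < Lenght:
--                 newString += string[index]
--         newString += " "
--
--     return newString
-- ===== SOURCE B (Python) =====
-- def Steps(string, steps):
--     return "".join(string[i:i + steps] + " " for i in range(0, len(string), steps))
-- ===== Notes on version B (the rewrite author's own statement) =====
-- stated objective: simpler
-- what changed: Replaced the nested char-by-char loop (ceil-division iteration count, inner index guard, per-character string concatenation) by a single pass over chunk start positions range(0, len, steps) joining slice-plus-space chunks.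
import Mathlib
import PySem

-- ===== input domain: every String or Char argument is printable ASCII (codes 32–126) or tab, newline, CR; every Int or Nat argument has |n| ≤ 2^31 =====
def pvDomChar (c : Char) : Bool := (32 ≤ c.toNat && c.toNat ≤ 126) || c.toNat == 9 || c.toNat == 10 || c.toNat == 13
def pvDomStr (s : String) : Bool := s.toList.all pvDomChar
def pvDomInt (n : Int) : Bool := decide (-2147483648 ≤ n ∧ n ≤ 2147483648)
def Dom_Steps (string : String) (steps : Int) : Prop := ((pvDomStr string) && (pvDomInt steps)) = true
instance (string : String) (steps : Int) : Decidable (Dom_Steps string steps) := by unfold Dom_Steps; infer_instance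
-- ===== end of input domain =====

-- B replaces A's nested char-by-char loop by one pass over chunk start positions joining
-- slice-plus-space chunks (objective: simpler).

-- ===== PORT A =====
-- 'math.ceil(Lenght / steps)' is ported as the exact ceiling division -((-Lenght) // steps):
-- on Dom_Steps (length and |steps| at most 2^31) the float true division rounds with absolute
-- error below 1/|steps|, so its ceiling equals the exact rational's ceiling.
def Steps (string : String) (steps : Int) : String :=
  let Lenght : Int := PySem.Str.len string
  let iterations : Int := -(PySem.Int.floordiv (-Lenght) steps)
  let newString : List Char :=
    (PySem.List.pyRange 0 iterations 1).foldl (fun ns i =>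
      ((PySem.List.pyRange 0 steps 1).foldl (fun ns j =>
        let index := i * steps + j
        -- 'string[index]' under the guard 'index < Lenght': in range, so pyGetD's default is never read
        if index < Lenght then ns ++ [PySem.List.pyGetD string.toList index ' '] else ns) ns)
      ++ [' ']) []
  String.ofList newString

-- ===== PORT B =====
def Steps_alt (string : String) (steps : Int) : String :=
  PySem.Str.join "" ((PySem.List.pyRange 0 (PySem.Str.len string) steps).map
    (fun i => PySem.Str.slice string (some i) (some (i + steps)) ++ " "))

-- ===== PRECONDITION & SPEC =====
-- Pre_ excludes only steps = 0, where A raises ZeroDivisionError (and B raises ValueError).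
def Pre_Steps (string : String) (steps : Int) : Prop := steps ≠ 0
instance (string : String) (steps : Int) : Decidable (Pre_Steps string steps) := by unfold Pre_Steps; infer_instance
def pvWitness_Steps : String × Int := ("abcde", 2)

def Spec_Steps (string : String) (steps : Int) (out : String) : Prop := out = Steps_alt string steps
instance (string : String) (steps : Int) (out : String) : Decidable (Spec_Steps string steps out) := by unfold Spec_Steps; infer_instance

-- ===== CLAIM (what is proved, stated in full; the proofs are below) =====
def Claim_equal_Steps : Prop := ∀ (string : String) (steps : Int), Dom_Steps string steps → Pre_Steps string steps → Spec_Steps string steps (Steps string steps)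

-- ===== LEMMAS AND PROOFS =====

-- ''.join(parts) is concatenation
theorem pv_join_empty (parts : List (List Char)) : PySem.Chars.join [] parts = parts.flatten := by
  induction parts with
  | nil => rfl
  | cons h t ih => cases t <;> simp_all [PySem.Chars.join, List.intercalate, List.intersperse]

-- the guarded inner loop of A collects exactly the chunk cs[a : a+m]
theorem pv_inner_chunk (cs : List Char) (a m : Nat) (d : Char) :
    ((PySem.List.pyRange 0 (m : Int) 1).filter
        (fun j => decide ((a : Int) + j < (cs.length : Int)))).map
      (fun j => PySem.List.pyGetD cs ((a : Int) + j) d)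
    = (cs.drop a).take m := by
  induction m with
  | zero => simp
  | succ m ih =>
    have h2 : PySem.List.pyRange 0 ((m + 1 : Nat) : Int) 1
        = PySem.List.pyRange 0 (m : Int) 1 ++ [(m : Int)] := by
      rw [show ((m + 1 : Nat) : Int) = (m : Int) + 1 by omega]
      exact PySem.List.pyRange_one_succ_right (by positivity)
    rw [h2, List.filter_append, List.map_append, ih, List.take_add_one]
    congr 1
    by_cases hm : a + m < cs.length
    · have hth : ((a : Int) + (m : Int) < (cs.length : Int)) := by exact_mod_cast hm
      have hc : ((a : Int) + (m : Int)) = ((a + m : Nat) : Int) := by omega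
      rw [List.getElem?_drop, List.getElem?_eq_getElem hm]
      rw [List.filter_cons_of_pos (by simpa using hth), List.filter_nil, List.map_cons,
        List.map_nil, hc, PySem.List.pyGetD_natCast, List.getD_eq_getElem?_getD,
        List.getElem?_eq_getElem hm]
      rfl
    · have hth : ¬ ((a : Int) + (m : Int) < (cs.length : Int)) := by push_cast; omega
      rw [List.filter_cons_of_neg (by simpa using hth), List.filter_nil, List.map_nil,
        List.getElem?_drop, List.getElem?_eq_none_iff.mpr (by omega : cs.length ≤ a + m)]
      rfl

-- A's ceiling-division iteration count equals the length count of range(0, L, steps), steps > 0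
theorem pv_iter_count (L steps : Int) (hL : 0 ≤ L) (hs : 0 < steps) :
    -(PySem.Int.floordiv (-L) steps)
      = ((if (0:Int) < L then ((L - 0 + steps - 1) / steps).toNat else 0 : Nat) : Int) := by
  rw [PySem.Int.neg_floordiv_neg_eq_iff_of_pos hs]
  by_cases h0 : (0:Int) < L
  · rw [if_pos h0]
    have hq : (0:Int) ≤ (L - 0 + steps - 1) / steps := by
      apply Int.ediv_nonneg <;> omega
    rw [Int.toNat_of_nonneg hq]
    have hd := Int.mul_ediv_add_emod (L - 0 + steps - 1) steps
    have hm1 := Int.emod_nonneg (L - 0 + steps - 1) (by omega : steps ≠ 0)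
    have hm2 := Int.emod_lt_of_pos (L - 0 + steps - 1) hs
    constructor <;> nlinarith [hd, hm1, hm2]
  · rw [if_neg h0]
    simp only [Nat.cast_zero]
    constructor <;> nlinarith

-- one chunk of A (inner loop result plus the space) is one chunk of B (slice plus the space)
theorem pv_chunk_eq (cs : List Char) (s : Nat) (k : Nat) :
    ((PySem.List.pyRange 0 (s:Int) 1).filter
        (fun j => decide ((k:Int) * (s:Int) + j < (cs.length:Int)))).map
        (fun j => PySem.List.pyGetD cs ((k:Int) * (s:Int) + j) ' ') ++ [' ']
    = PySem.List.slice cs (some ((s:Int) * (k:Int))) (some ((s:Int) * (k:Int) + (s:Int)))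
        ++ [' '] := by
  have ha : (k:Int) * (s:Int) = ((k * s : Nat) : Int) := by push_cast; ring
  have ha' : (s:Int) * (k:Int) = ((k * s : Nat) : Int) := by push_cast; ring
  congr 1
  rw [ha, ha', pv_inner_chunk cs (k * s) s ' ',
    show ((k*s:Nat):Int) + (s:Int) = ((k * s + s : Nat) : Int) by push_cast; ring,
    PySem.List.slice_toNat cs (by positivity) (by positivity)]
  rw [Int.toNat_natCast, Int.toNat_natCast, Nat.add_sub_cancel_left]

-- ===== VERDICT (by name: the statement is the Claim_ definition above) =====
theorem Steps_spec : Claim_equal_Steps := by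
  intro string steps _ hpre
  unfold Pre_Steps at hpre
  unfold Spec_Steps
  apply String.ext
  show (Steps string steps).toList = (Steps_alt string steps).toList
  have hL : (0:Int) ≤ (string.toList.length : Int) := by positivity
  -- A-side normal form
  have hA : (Steps string steps).toList
      = (PySem.List.pyRange 0 (-(PySem.Int.floordiv (-(string.toList.length:Int)) steps)) 1).flatMap
          (fun i => ((PySem.List.pyRange 0 steps 1).filter
              (fun j => decide (i * steps + j < (string.toList.length:Int)))).map
            (fun j => PySem.List.pyGetD string.toList (i * steps + j) ' ') ++ [' ']) := by
    unfold Steps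
    rw [String.toList_ofList]
    simp only [PySem.Str.len_eq]
    rw [List.foldl_ext _ (fun ns i =>
        ns ++ (((PySem.List.pyRange 0 steps 1).filter
            (fun j => decide (i * steps + j < (string.toList.length:Int)))).map
          (fun j => PySem.List.pyGetD string.toList (i * steps + j) ' ') ++ [' ']))]
    · rw [PySem.List.foldl_append_eq_flatMap]; rfl
    · intro ns i _
      show List.foldl (fun ns j => if i * steps + j < (string.toList.length:Int)
              then ns ++ [PySem.List.pyGetD string.toList (i * steps + j) ' '] else ns) ns
            (PySem.List.pyRange 0 steps 1) ++ [' ']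
          = ns ++ (((PySem.List.pyRange 0 steps 1).filter
              (fun j => decide (i * steps + j < (string.toList.length:Int)))).map
            (fun j => PySem.List.pyGetD string.toList (i * steps + j) ' ') ++ [' '])
      simp only [PySem.List.foldl_append_ite]
      simp
  -- B-side normal form
  have hB : (Steps_alt string steps).toList
      = (PySem.List.pyRange 0 (string.toList.length:Int) steps).flatMap
          (fun i => PySem.List.slice string.toList (some i) (some (i + steps)) ++ [' ']) := by
    unfold Steps_alt
    rw [PySem.Str.toList_join]
    simp only [List.map_map, PySem.Str.len_eq]
    rw [show ("" : String).toList = [] from rfl, pv_join_empty, ← List.flatMap_def]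
    congr 1
    funext i
    show (PySem.Str.slice string (some i) (some (i + steps)) ++ " ").toList = _
    rw [String.toList_append, PySem.Str.toList_slice, PySem.Chars.slice_eq_listSlice]
    rfl
  rw [hA, hB]
  rcases lt_or_gt_of_ne hpre with hneg | hpos
  · -- steps < 0: both iteration lists are empty
    have h1 : PySem.List.pyRange 0 (-(PySem.Int.floordiv (-(string.toList.length:Int)) steps)) 1 = [] := by
      apply PySem.List.pyRange_one_eq_nil
      have : 0 ≤ PySem.Int.floordiv (-(string.toList.length:Int)) steps :=
        Int.fdiv_nonneg_of_nonpos_of_nonpos (by omega) hneg.le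
      omega
    have h2 : PySem.List.pyRange 0 (string.toList.length:Int) steps = [] := by
      simp [PySem.List.pyRange, hneg.ne, not_lt.mpr hneg.le]
    rw [h1, h2]
    rfl
  · -- steps > 0: both sides are the same concatenation of ceil(L/steps) chunks
    obtain ⟨s, rfl⟩ : ∃ s : Nat, steps = (s:Int) := ⟨steps.toNat, by omega⟩
    rw [pv_iter_count _ _ hL hpos, PySem.List.pyRange_of_pos 0 (string.toList.length:Int) hpos]
    set m : Nat := (if (0:Int) < (string.toList.length:Int)
        then (((string.toList.length:Int) - 0 + (s:Int) - 1) / (s:Int)).toNat else 0) with hm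
    clear_value m
    have hout : PySem.List.pyRange 0 ((m:Nat):Int) 1 = List.map (fun k : Nat => (k:Int)) (List.range m) := by
      simp [PySem.List.pyRange_one]
    rw [hout]
    simp only [zero_add]
    rw [List.flatMap_map, List.flatMap_map, List.flatMap_def, List.flatMap_def]
    congr 1
    exact List.map_congr_left (fun k _ => pv_chunk_eq string.toList s k)
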